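-- pv_equiv track=rewrite | github.com/Basinica22/Evaluacion-Transversal | Funciones.py | ComprobarAsiento
-- ===== SOURCE A (Python) =====
-- def ComprobarAsiento(arreglo,num_asiento):
--     x = 0
--     for f in range(10):
--         for c in range(10):
--             x = x + 1
--             if str(x) == str(num_asiento):
--                 if arreglo[f][c]=='XX':
--                     return  False
--     return True
-- ===== SOURCE B (Python) =====
-- def ComprobarAsiento(arreglo, num_asiento):
--     # Direct arithmetic: seat n (1..100) sits at row (n-1)//10, column (n-1)%10.
--     if 1 <= num_asiento <= 100:
--         f, c = divmod(num_asiento - 1, 10)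
--         return arreglo[f][c] != 'XX'
--     return True
-- ===== Notes on version B (the rewrite author's own statement) =====
-- stated objective: simpler
-- what changed: Replaced the nested 10x10 counting scan (with per-iteration str comparisons) by direct O(1) index arithmetic: if 1 <= n <= 100 the seat is at divmod(n-1, 10), otherwise the seat number matches no counter value and the function returns True.
import Mathlib
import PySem

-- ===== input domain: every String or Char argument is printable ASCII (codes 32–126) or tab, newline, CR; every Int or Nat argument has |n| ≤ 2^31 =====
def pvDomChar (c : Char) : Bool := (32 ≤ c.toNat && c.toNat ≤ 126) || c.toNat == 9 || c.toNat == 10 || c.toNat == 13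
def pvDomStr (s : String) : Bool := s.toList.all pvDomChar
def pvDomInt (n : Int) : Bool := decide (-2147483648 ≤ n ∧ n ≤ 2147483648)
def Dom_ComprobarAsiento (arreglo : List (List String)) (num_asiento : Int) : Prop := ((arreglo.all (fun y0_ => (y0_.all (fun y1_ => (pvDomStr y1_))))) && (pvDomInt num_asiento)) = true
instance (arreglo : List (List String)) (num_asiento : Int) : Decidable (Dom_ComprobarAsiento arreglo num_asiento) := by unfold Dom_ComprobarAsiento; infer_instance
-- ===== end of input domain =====

-- B replaces A's nested 10x10 counting scan by direct divmod index arithmetic (simpler, same result).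

-- ===== PORT A =====
-- inner 'for c in range(10)' loop: threads the counter x, early-returns Some false
def pvA_inner (arreglo : List (List String)) (num : Int) (f : Int) : Int → List Int → Option Bool × Int
  | x, [] => (none, x)
  | x, c :: cs =>
      let x' := x + 1
      if PySem.Int.toStr x' == PySem.Int.toStr num then
        if PySem.List.pyGetD (PySem.List.pyGetD arreglo f []) c "" == "XX" then (some false, x')
        else pvA_inner arreglo num f x' cs
      else pvA_inner arreglo num f x' cs

-- outer 'for f in range(10)' loop
def pvA_outer (arreglo : List (List String)) (num : Int) : Int → List Int → Option Bool
  | _, [] => none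
  | x, f :: fs =>
      match pvA_inner arreglo num f x (PySem.List.pyRange 0 10 1) with
      | (some b, _) => some b
      | (none, x') => pvA_outer arreglo num x' fs

def ComprobarAsiento (arreglo : List (List String)) (num_asiento : Int) : Bool :=
  (pvA_outer arreglo num_asiento 0 (PySem.List.pyRange 0 10 1)).getD true

-- ===== PORT B =====
def ComprobarAsiento_alt (arreglo : List (List String)) (num_asiento : Int) : Bool :=
  if 1 ≤ num_asiento ∧ num_asiento ≤ 100 then
    PySem.List.pyGetD
      (PySem.List.pyGetD arreglo (PySem.Int.floordiv (num_asiento - 1) 10) [])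
      (PySem.Int.mod (num_asiento - 1) 10) "" != "XX"
  else true

-- ===== PRECONDITION & SPEC =====
-- Pre_ excludes exactly the inputs on which Python A raises IndexError: a seat number 1..100
-- whose row/column index falls outside the given grid (B raises there too).
def Pre_ComprobarAsiento (arreglo : List (List String)) (num_asiento : Int) : Prop :=
  (1 ≤ num_asiento ∧ num_asiento ≤ 100) →
    ((num_asiento - 1) / 10 < (arreglo.length : Int) ∧
     (num_asiento - 1) % 10 < ((arreglo.getD ((num_asiento - 1) / 10).toNat []).length : Int))
instance (arreglo : List (List String)) (num_asiento : Int) : Decidable (Pre_ComprobarAsiento arreglo num_asiento) := by unfold Pre_ComprobarAsiento; infer_instance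

def pvWitness_ComprobarAsiento : List (List String) × Int :=
  ([["A","B","C","D","E","F","G","H","I","J"]], 3)

def Spec_ComprobarAsiento (arreglo : List (List String)) (num_asiento : Int) (out : Bool) : Prop := out = ComprobarAsiento_alt arreglo num_asiento
instance (arreglo : List (List String)) (num_asiento : Int) (out : Bool) : Decidable (Spec_ComprobarAsiento arreglo num_asiento out) := by unfold Spec_ComprobarAsiento; infer_instance

-- ===== CLAIM (what is proved, stated in full; the proofs are below) =====
def Claim_equal_ComprobarAsiento : Prop := ∀ (arreglo : List (List String)) (num_asiento : Int), Dom_ComprobarAsiento arreglo num_asiento → Pre_ComprobarAsiento arreglo num_asiento → Spec_ComprobarAsiento arreglo num_asiento (ComprobarAsiento arreglo num_asiento)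

-- ===== LEMMAS AND PROOFS =====

-- str(n) is injective on Int: first for Nat.toDigits, then for the sign case.
theorem pv_digitChar_inj (a b : Nat) (ha : a < 10) (hb : b < 10)
    (h : Nat.digitChar a = Nat.digitChar b) : a = b := by
  interval_cases a <;> interval_cases b <;> simp_all [Nat.digitChar]

theorem pv_toDigits_inj (a : Nat) : ∀ b : Nat, Nat.toDigits 10 a = Nat.toDigits 10 b → a = b := by
  induction a using Nat.strong_induction_on with
  | _ a ih =>
    intro b h
    rw [Nat.toDigits_eq_if (by norm_num)] at h
    rw [Nat.toDigits_eq_if (n := b) (by norm_num)] at h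
    split_ifs at h with hA hB hB
    · simp only [List.cons.injEq, and_true] at h
      exact pv_digitChar_inj a b hA hB h
    · have hlen := congrArg List.length h
      simp only [List.length_cons, List.length_append, List.length_nil] at hlen
      have hp := @Nat.length_toDigits_pos 10 (b / 10)
      omega
    · have hlen := congrArg List.length h
      simp only [List.length_cons, List.length_append, List.length_nil] at hlen
      have hp := @Nat.length_toDigits_pos 10 (a / 10)
      omega
    · have hinj := List.append_inj' h (by simp)
      have h1 : a / 10 = b / 10 :=
        ih (a / 10) (Nat.div_lt_self (by omega) (by norm_num)) (b / 10) hinj.1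
      have h2 : a % 10 = b % 10 :=
        pv_digitChar_inj _ _ (Nat.mod_lt _ (by norm_num)) (Nat.mod_lt _ (by norm_num))
          (by simpa using hinj.2)
      omega

theorem pv_toStr_inj (a b : Int) (h : PySem.Int.toStr a = PySem.Int.toStr b) : a = b := by
  have h' : PySem.Int.toChars a = PySem.Int.toChars b := by
    have := congrArg String.toList h
    simpa [PySem.Int.toList_toStr] using this
  unfold PySem.Int.toChars at h'
  by_cases hA : a < 0 <;> by_cases hB : b < 0 <;> simp only [hA, hB, reduceIte] at h'
  · have := pv_toDigits_inj a.natAbs b.natAbs (by simpa using h')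
    omega
  · have hm : '-' ∈ Nat.toDigits 10 b.toNat := by
      rw [← h']; exact List.mem_cons_self
    have := Nat.isDigit_of_mem_toDigits (by norm_num) (by norm_num) hm
    simp [Char.isDigit] at this
  · have hm : '-' ∈ Nat.toDigits 10 a.toNat := by
      rw [h']; exact List.mem_cons_self
    have := Nat.isDigit_of_mem_toDigits (by norm_num) (by norm_num) hm
    simp [Char.isDigit] at this
  · have := pv_toDigits_inj a.toNat b.toNat h'
    omega

theorem pv_toStr_beq (a b : Int) :
    (PySem.Int.toStr a == PySem.Int.toStr b) = (a == b) := by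
  rcases eq_or_ne a b with h | h
  · simp [h]
  · have : PySem.Int.toStr a ≠ PySem.Int.toStr b := fun hq => h (pv_toStr_inj a b hq)
    simp [h, this]

-- inner loop: no counter value in (x, x + len] equals num → scan falls through
theorem pv_inner_nomatch (arreglo : List (List String)) (num f : Int) (cs : List Int) :
    ∀ x : Int, ¬ (x < num ∧ num ≤ x + cs.length) →
      pvA_inner arreglo num f x cs = (none, x + cs.length) := by
  induction cs with
  | nil => intro x _; simp [pvA_inner]
  | cons c cs ih =>
    intro x h
    have hx : x + 1 ≠ num := by simp at h; omega
    simp only [pvA_inner, pv_toStr_beq]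
    rw [if_neg (by simpa using hx)]
    rw [ih (x + 1) (by simp at h ⊢; omega)]
    simp; omega

-- inner loop: num in (x, x + len] → the scan reaches exactly counter value num
theorem pv_inner_match (arreglo : List (List String)) (num f : Int) (cs : List Int) :
    ∀ x : Int, x < num → num ≤ x + cs.length →
      pvA_inner arreglo num f x cs =
        (if PySem.List.pyGetD (PySem.List.pyGetD arreglo f []) (cs.getD (num - x - 1).toNat 0) "" == "XX"
         then ((some false : Option Bool), num) else (none, x + cs.length)) := by
  induction cs with
  | nil => intro x h1 h2; simp at h2; omega
  | cons c cs ih =>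
    intro x h1 h2
    by_cases hx : x + 1 = num
    · simp only [pvA_inner, pv_toStr_beq]
      rw [if_pos (by simpa using hx)]
      have hidx : (num - x - 1).toNat = 0 := by omega
      rw [hidx]
      simp only [List.getD_cons_zero]
      split
      · simp [hx]
      · rw [pv_inner_nomatch arreglo num f cs (x + 1) (by omega)]
        simp; omega
    · simp only [pvA_inner, pv_toStr_beq]
      rw [if_neg (by simpa using hx)]
      rw [ih (x + 1) (by omega) (by simp at h2 ⊢; omega)]
      have hidx : (num - x - 1).toNat = (num - (x + 1) - 1).toNat + 1 := by omega
      rw [hidx]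
      simp only [List.getD_cons_succ]
      have : x + 1 + (cs.length : Int) = x + ((c :: cs).length : Int) := by simp; omega
      rw [this]

theorem pv_range10_len : ((PySem.List.pyRange 0 10 1).length : Int) = 10 := by decide

-- outer loop: num beyond every remaining decade → the whole scan falls through
theorem pv_outer_none (arreglo : List (List String)) (num : Int) (fs : List Int) :
    ∀ x : Int, ¬ (x < num ∧ num ≤ x + 10 * fs.length) →
      pvA_outer arreglo num x fs = none := by
  induction fs with
  | nil => intro x _; simp [pvA_outer]
  | cons f fs ih =>
    intro x h
    simp only [pvA_outer]
    rw [pv_inner_nomatch arreglo num f _ x (by rw [pv_range10_len] at *; simp at h; omega)]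
    rw [pv_range10_len]
    exact ih (x + 10) (by simp at h ⊢; omega)

-- outer loop: num within the remaining decades → A answers from the matched cell
theorem pv_outer_match (arreglo : List (List String)) (num : Int) (fs : List Int) :
    ∀ x : Int, x < num → num ≤ x + 10 * fs.length →
      pvA_outer arreglo num x fs =
        (if PySem.List.pyGetD (PySem.List.pyGetD arreglo (fs.getD ((num - x - 1) / 10).toNat 0) []) ((num - x - 1) % 10) "" == "XX"
         then some false else none) := by
  induction fs with
  | nil => intro x h1 h2; simp at h2; omega
  | cons f fs ih =>
    intro x h1 h2
    by_cases hd : num ≤ x + 10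
    · simp only [pvA_outer]
      rw [pv_inner_match arreglo num f _ x h1 (by rw [pv_range10_len]; omega), pv_range10_len]
      have hel : (PySem.List.pyRange 0 10 1).getD (num - x - 1).toNat 0 = num - x - 1 := by
        have hlt : (num - x - 1).toNat < (PySem.List.pyRange 0 10 1).length := by
          have := pv_range10_len; omega
        rw [List.getD_eq_getElem _ _ hlt, PySem.List.getElem_pyRange_one]
        omega
      rw [hel]
      have hq : ((num - x - 1) / 10).toNat = 0 := by omega
      have hm : (num - x - 1) % 10 = num - x - 1 := by omega
      rw [hq, hm]
      simp only [List.getD_cons_zero]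
      split_ifs with hc
      · rfl
      · exact pv_outer_none arreglo num fs (x + 10) (by omega)
    · simp only [pvA_outer]
      rw [pv_inner_nomatch arreglo num f _ x (by rw [pv_range10_len]; omega), pv_range10_len]
      have hq : ((num - x - 1) / 10).toNat = ((num - (x + 10) - 1) / 10).toNat + 1 := by omega
      have hm : (num - x - 1) % 10 = (num - (x + 10) - 1) % 10 := by omega
      rw [hq, hm]
      simp only [List.getD_cons_succ]
      exact ih (x + 10) (by omega) (by simp at h2 ⊢; omega)

-- ===== VERDICT (by name: the statement is the Claim_ definition above) =====
theorem ComprobarAsiento_spec : Claim_equal_ComprobarAsiento := by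
  intro arreglo num _dom _pre
  unfold Spec_ComprobarAsiento ComprobarAsiento ComprobarAsiento_alt
  by_cases h : 1 ≤ num ∧ num ≤ 100
  · rw [pv_outer_match arreglo num _ 0 (by omega) (by rw [pv_range10_len]; omega)]
    have hel : (PySem.List.pyRange 0 10 1).getD ((num - 0 - 1) / 10).toNat 0 = (num - 1) / 10 := by
      have hlt : ((num - 0 - 1) / 10).toNat < (PySem.List.pyRange 0 10 1).length := by
        have := pv_range10_len; omega
      rw [List.getD_eq_getElem _ _ hlt, PySem.List.getElem_pyRange_one]
      omega
    rw [hel]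
    have hf : PySem.Int.floordiv (num - 1) 10 = (num - 1) / 10 :=
      PySem.Int.floordiv_eq_ediv_of_pos (by norm_num)
    have hm : PySem.Int.mod (num - 1) 10 = (num - 1) % 10 :=
      PySem.Int.mod_eq_emod_of_pos (by norm_num)
    have hm0 : num - 0 - 1 = num - 1 := by omega
    rw [hm0, if_pos h, hf, hm]
    split_ifs with hc
    · simp [bne, hc]
    · simp [bne, hc]
  · rw [pv_outer_none arreglo num _ 0 (by rw [pv_range10_len]; omega)]
    rw [if_neg h]
    rfl
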